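-- pv_equiv track=rewrite | github.com/chuaaron/mini-swe-agent | src/minisweagent/environments/repo_mounts.py | _iter_mount_specs
-- ===== SOURCE A (Python) =====
-- from typing import Iterable
--
-- def _iter_mount_specs(run_args: Iterable[str]) -> Iterable[str]:
--     idx = 0
--     args = list(run_args)
--     while idx < len(args):
--         token = args[idx]
--         if token in {"-v", "--volume"} and idx + 1 < len(args):
--             yield args[idx + 1]
--             idx += 2
--             continue
--         if token.startswith("-v=") or token.startswith("--volume="):
--             yield token.split("=", 1)[1]
--         idx += 1
-- ===== SOURCE B (Python) =====
-- def _iter_mount_specs(run_args):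
--     # Segment-based: repeatedly find the first bare flag, emit the '='-form
--     # specs from the segment before it, then the flag's value, and continue
--     # after the value; the final flagless segment is handled by one filter+map.
--     args = list(run_args)
--     out = []
--     while True:
--         try:
--             i = next(k for k, t in enumerate(args) if t in ("-v", "--volume"))
--         except StopIteration:
--             out.extend(t.split("=", 1)[1] for t in args
--                        if t.startswith(("-v=", "--volume=")))
--             return out
--         out.extend(t.split("=", 1)[1] for t in args[:i]
--                    if t.startswith(("-v=", "--volume=")))
--         if i + 1 < len(args):
--             out.append(args[i + 1])
--         args = args[i + 2:]
-- ===== Notes on version B (the rewrite author's own statement) =====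
-- stated objective: alternative
-- what changed: Replaced the token-by-token index walk by a segment-based algorithm: repeatedly locate the first bare -v/--volume flag, flush the '='-form specs of the preceding segment with one filter+map, append the flag's value, and continue after it; the trailing flagless segment is one filter+map pass.
import Mathlib
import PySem

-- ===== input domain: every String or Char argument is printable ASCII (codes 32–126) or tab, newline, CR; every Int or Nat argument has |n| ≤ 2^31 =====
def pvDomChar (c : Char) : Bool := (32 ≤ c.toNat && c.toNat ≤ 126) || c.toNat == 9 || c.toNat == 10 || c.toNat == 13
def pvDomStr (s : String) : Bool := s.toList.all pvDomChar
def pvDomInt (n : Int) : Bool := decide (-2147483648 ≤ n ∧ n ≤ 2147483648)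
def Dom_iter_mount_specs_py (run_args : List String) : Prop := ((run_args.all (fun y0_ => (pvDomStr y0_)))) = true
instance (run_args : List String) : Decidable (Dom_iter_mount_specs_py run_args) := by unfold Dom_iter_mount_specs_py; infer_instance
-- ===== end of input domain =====

-- B replaces A's token-by-token index walk by a segment-based algorithm (find first bare flag,
-- flush the preceding segment with one filter+map, take the value, continue after it); same return value.

-- token.split("=", 1)[1], used by both Pythons on tokens guaranteed to contain '='
def pySplitEqTail (t : String) : String :=
  (((PySem.Str.splitMax? t "=" 1).getD []).getD 1 "")

-- ===== PORT A =====
-- A's while-loop over an index idx, advancing by 2 after a bare flag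
def iterAGo (args : List String) (idx : Nat) : List String :=
  if h : idx < args.length then
    let token := args[idx]
    if h2 : (token = "-v" ∨ token = "--volume") ∧ idx + 1 < args.length then
      args[idx + 1]'h2.2 :: iterAGo args (idx + 2)
    else if PySem.Str.startswith token "-v=" || PySem.Str.startswith token "--volume=" then
      pySplitEqTail token :: iterAGo args (idx + 1)
    else iterAGo args (idx + 1)
  else []
termination_by args.length - idx

def iter_mount_specs_py (run_args : List String) : List String :=
  iterAGo run_args 0

-- ===== PORT B =====
def isFlag (t : String) : Bool := t == "-v" || t == "--volume"

def isEqForm (t : String) : Bool :=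
  PySem.Str.startswith t "-v=" || PySem.Str.startswith t "--volume="

-- the filter+map pass Source B applies to a flag-free segment
def segSpecs (seg : List String) : List String :=
  (seg.filter isEqForm).map pySplitEqTail

-- needed by iterBGo's decreasing_by
theorem findIdx?_lt_len {α : Type} (p : α → Bool) (l : List α) (i : Nat)
    (h : l.findIdx? p = some i) : i < l.length := by
  rw [List.findIdx?_eq_some_iff_getElem] at h
  exact h.1

-- Source B's loop: find first bare flag; flush segment before it; value; continue after it
def iterBGo (args : List String) : List String :=
  match h : args.findIdx? isFlag with
  | none => segSpecs args
  | some i =>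
      segSpecs (args.take i)
      ++ (if i + 1 < args.length then [args.getD (i + 1) ""] else [])
      ++ iterBGo (args.drop (i + 2))
termination_by args.length
decreasing_by
  have := findIdx?_lt_len isFlag args i h
  simp; omega

def iter_mount_specs_py_alt (run_args : List String) : List String :=
  iterBGo run_args

-- ===== PRECONDITION & SPEC =====
def Spec_iter_mount_specs_py (run_args : List String) (out : List String) : Prop := out = iter_mount_specs_py_alt run_args
instance (run_args : List String) (out : List String) : Decidable (Spec_iter_mount_specs_py run_args out) := by unfold Spec_iter_mount_specs_py; infer_instance

-- ===== CLAIM (what is proved, stated in full; the proofs are below) =====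
def Claim_equal_iter_mount_specs_py : Prop := ∀ (run_args : List String), Dom_iter_mount_specs_py run_args → Spec_iter_mount_specs_py run_args (iter_mount_specs_py run_args)

-- ===== LEMMAS AND PROOFS =====

-- intermediate token-by-token recursion, bridging the two loop shapes
def scanTok : List String → List String
  | [] => []
  | token :: rest =>
    if token = "-v" ∨ token = "--volume" then
      match rest with
      | [] => []
      | v :: rest' => v :: scanTok rest'
    else if PySem.Str.startswith token "-v=" || PySem.Str.startswith token "--volume=" then
      pySplitEqTail token :: scanTok rest
    else scanTok rest

theorem isFlag_iff (t : String) : isFlag t = true ↔ (t = "-v" ∨ t = "--volume") := by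
  simp [isFlag]

theorem iterBGo_eq (args : List String) : iterBGo args =
    match args.findIdx? isFlag with
    | none => segSpecs args
    | some i =>
        segSpecs (args.take i)
        ++ (if i + 1 < args.length then [args.getD (i + 1) ""] else [])
        ++ iterBGo (args.drop (i + 2)) := by
  rw [iterBGo]
  cases hf : args.findIdx? isFlag <;> rfl

theorem iterAGo_eq_scan_drop : ∀ (n : Nat) (args : List String) (idx : Nat),
    args.length - idx ≤ n → iterAGo args idx = scanTok (args.drop idx) := by
  intro n
  induction n with
  | zero =>
    intro args idx h
    have hlen : args.length ≤ idx := by omega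
    rw [iterAGo, List.drop_eq_nil_of_le hlen]
    simp [scanTok, Nat.not_lt.mpr hlen]
  | succ n ih =>
    intro args idx h
    by_cases hlt : idx < args.length
    · have hdrop : args.drop idx = args[idx] :: args.drop (idx + 1) :=
        List.drop_eq_getElem_cons hlt
      rw [iterAGo]
      simp only [hlt, dif_pos]
      by_cases h2 : (args[idx] = "-v" ∨ args[idx] = "--volume") ∧ idx + 1 < args.length
      · have hdrop2 : args.drop (idx + 1) = args[idx + 1] :: args.drop (idx + 2) := by
          simpa using List.drop_eq_getElem_cons h2.2
        rw [dif_pos h2, hdrop, hdrop2]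
        simp only [scanTok]
        simp only [h2.1, if_pos]
        rw [ih args (idx + 2) (by omega)]
      · rw [dif_neg h2, hdrop]
        rw [scanTok.eq_def]
        simp only []
        by_cases hflag : args[idx] = "-v" ∨ args[idx] = "--volume"
        · -- bare flag at the very end: idx + 1 ≥ length, both sides drop it
          have hend : args.length ≤ idx + 1 := by
            rcases Nat.lt_or_ge (idx + 1) args.length with h' | h'
            · exact absurd ⟨hflag, h'⟩ h2
            · exact h'
          have hnil : args.drop (idx + 1) = [] := List.drop_eq_nil_of_le hend
          have hsw : (PySem.Str.startswith args[idx] "-v=" ||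
              PySem.Str.startswith args[idx] "--volume=") = false := by
            rcases hflag with h' | h' <;> rw [h'] <;> decide
          rw [hsw, if_pos hflag, hnil]
          simp only [Bool.false_eq_true, if_false]
          rw [ih args (idx + 1) (by omega), hnil]
          rfl
        · rw [if_neg hflag]
          by_cases hsw : (PySem.Str.startswith args[idx] "-v=" ||
              PySem.Str.startswith args[idx] "--volume=") = true
          · rw [if_pos hsw, if_pos hsw, ih args (idx + 1) (by omega)]
          · rw [if_neg hsw, if_neg hsw, ih args (idx + 1) (by omega)]
    · have hlen : args.length ≤ idx := Nat.not_lt.mp hlt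
      rw [iterAGo, List.drop_eq_nil_of_le hlen]
      simp [scanTok, hlt]

theorem scan_eq_segSpecs_of_no_flag : ∀ (l : List String),
    (∀ x ∈ l, isFlag x = false) → scanTok l = segSpecs l := by
  intro l
  induction l with
  | nil => intro _; rfl
  | cons a l ih =>
    intro h
    have hp : isFlag a = false := h a (by simp)
    have hp' : ¬(a = "-v" ∨ a = "--volume") := by
      intro hc; rw [(isFlag_iff a).mpr hc] at hp; exact Bool.true_eq_false ▸ hp
    rw [scanTok.eq_def]
    simp only [hp', if_false]
    rw [ih (fun x hx => h x (by simp [hx]))]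
    by_cases hq : (PySem.Str.startswith a "-v=" || PySem.Str.startswith a "--volume=") = true
    · have hq' : isEqForm a = true := by rw [isEqForm]; simpa using hq
      rw [if_pos hq]
      simp [segSpecs, List.filter_cons, hq']
    · have hq' : isEqForm a = false := by rw [isEqForm]; simpa using hq
      rw [if_neg hq]
      simp [segSpecs, List.filter_cons, hq']

theorem iterBGo_nil : iterBGo [] = [] := by
  rw [iterBGo_eq]; rfl

theorem scan_eq_iterBGo : ∀ (n : Nat) (l : List String),
    l.length ≤ n → scanTok l = iterBGo l := by
  intro n
  induction n with
  | zero =>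
    intro l h
    have : l = [] := List.eq_nil_of_length_eq_zero (by omega)
    subst this
    exact iterBGo_nil.symm
  | succ n ih =>
    intro l hlen
    cases l with
    | nil => exact iterBGo_nil.symm
    | cons a l =>
      by_cases hp : isFlag a = true
      · have hf : (a :: l).findIdx? isFlag = some 0 := by
          rw [List.findIdx?_cons, hp]; rfl
        rw [iterBGo_eq, hf]
        rw [scanTok.eq_def]
        simp only [(isFlag_iff a).mp hp, if_pos]
        cases l with
        | nil =>
          simp [segSpecs, iterBGo_nil]
        | cons v l' =>
          have hlt : (0 + 1) < (a :: v :: l').length := by simp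
          rw [if_pos hlt]
          simp only [List.getD, List.drop, segSpecs, List.filter_nil, List.map_nil,
            List.nil_append]
          rw [ih l' (by simp at hlen; omega)]
          rfl
      · have hp' : ¬(a = "-v" ∨ a = "--volume") := fun hc => hp ((isFlag_iff a).mpr hc)
        cases hfl : l.findIdx? isFlag with
        | none =>
          have hf : (a :: l).findIdx? isFlag = none := by
            rw [List.findIdx?_cons, if_neg (by simpa using hp), hfl]; rfl
          rw [iterBGo_eq, hf]
          apply scan_eq_segSpecs_of_no_flag
          intro x hx
          rcases List.mem_cons.mp hx with rfl | hx'
          · simpa using hp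
          · have := List.findIdx?_eq_none_iff.mp hfl x hx'
            simpa using this
        | some j =>
          have hf : (a :: l).findIdx? isFlag = some (j + 1) := by
            rw [List.findIdx?_cons, if_neg (by simpa using hp), hfl]; rfl
          rw [iterBGo_eq, hf]
          rw [scanTok.eq_def]
          simp only [hp', if_false]
          have hIH : scanTok l = iterBGo l := ih l (by simp at hlen; omega)
          rw [hIH, iterBGo_eq l, hfl]
          have htake : (a :: l).take (j + 1) = a :: l.take j := by simp
          have hdrop : (a :: l).drop (j + 1 + 2) = l.drop (j + 2) := by
            simp [List.drop_succ_cons]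
          have hgetD : (a :: l).getD (j + 1 + 1) "" = l.getD (j + 1) "" := by
            simp [List.getD]
          have hlen2 : (j + 1 + 1 < (a :: l).length) ↔ (j + 1 < l.length) := by
            simp
          simp only [htake, hdrop, hgetD]
          by_cases hq : (PySem.Str.startswith a "-v=" || PySem.Str.startswith a "--volume=") = true
          · have hq' : isEqForm a = true := by rw [isEqForm]; simpa using hq
            rw [if_pos hq]
            simp [segSpecs, List.filter_cons, hq', hlen2]
          · have hq' : isEqForm a = false := by rw [isEqForm]; simpa using hq
            rw [if_neg hq]
            simp [segSpecs, List.filter_cons, hq', hlen2]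

-- ===== VERDICT (by name: the statement is the Claim_ definition above) =====
theorem iter_mount_specs_py_spec : Claim_equal_iter_mount_specs_py := by
  intro run_args _
  unfold Spec_iter_mount_specs_py iter_mount_specs_py iter_mount_specs_py_alt
  rw [iterAGo_eq_scan_drop run_args.length run_args 0 (by omega)]
  rw [List.drop_zero, scan_eq_iterBGo run_args.length run_args (by omega)]
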